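-- pv_equiv track=rewrite | github.com/Yawn-Sean/Daily_CF_Problems | daily_problems/2024/07/0717/personal_submission/cf1594d_liryc.py | solve
-- ===== SOURCE A (Python) =====
-- from collections import deque
--
-- def solve(n, m, g):
--     a = [-1] * n
--     ans = 0
--     for i in range(n):
--         if a[i] < 0:
--             dq = deque()
--             a[i] = 0
--             k, c = 1, 0
--             dq.append(i)
--             while dq:
--                 i = dq.pop()
--                 for j, t in g[i]:
--                     if a[j] >= 0:
--                         if a[j] != a[i] ^ t:
--                             return -1
--                     else:
--                         a[j] = a[i] ^ t
--                         k += 1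
--                         c += a[j]
--                         dq.append(j)
--             ans += max(c, k - c)
--     return ans
-- ===== SOURCE B (Python) =====
-- def solve(n, m, g):
--     # Layered BFS 2-coloring with deferred per-component counting
--     # (A does stack-DFS with incremental counters).
--     color = [-1] * n
--     total = 0
--     for s in range(n):
--         if color[s] >= 0:
--             continue
--         color[s] = 0
--         frontier = [s]
--         comp = [s]
--         while frontier:
--             nxt = []
--             for u in frontier:
--                 for v, t in g[u]:
--                     w = color[u] ^ t
--                     if color[v] >= 0:
--                         if color[v] != w:
--                             return -1
--                     else:
--                         color[v] = w
--                         comp.append(v)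
--                         nxt.append(v)
--             frontier = nxt
--         ones = sum(color[v] for v in comp)
--         total += max(ones, len(comp) - ones)
--     return total
-- ===== Notes on version B (the rewrite author's own statement) =====
-- stated objective: alternative
-- what changed: Replaces the LIFO stack-DFS with incremental size/colour counters and an early colour write-back by a layered FIFO BFS over frontier lists that records each component's vertex list and obtains the two colour-class sizes afterwards by summing the final colours over that list.
-- outside the precondition, e.g. on solve(2, 0, [[(-1, 1)], []]): A returns 1, B returns 1
import Mathlib
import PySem

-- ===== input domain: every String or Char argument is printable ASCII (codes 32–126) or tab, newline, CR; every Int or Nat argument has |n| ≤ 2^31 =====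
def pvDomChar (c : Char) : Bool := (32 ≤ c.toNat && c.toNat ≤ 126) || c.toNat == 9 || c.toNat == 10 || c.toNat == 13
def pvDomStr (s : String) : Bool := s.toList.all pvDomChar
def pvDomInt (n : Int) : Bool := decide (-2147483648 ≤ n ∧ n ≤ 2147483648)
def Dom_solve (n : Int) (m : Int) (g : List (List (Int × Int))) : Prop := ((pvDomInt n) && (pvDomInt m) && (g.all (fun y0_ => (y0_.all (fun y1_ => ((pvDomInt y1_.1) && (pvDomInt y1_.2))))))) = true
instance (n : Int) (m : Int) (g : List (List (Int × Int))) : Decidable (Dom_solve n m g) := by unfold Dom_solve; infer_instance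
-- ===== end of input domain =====

-- B replaces A's stack-DFS with incremental counters by a layered BFS that sums colours per component at the end (objective: alternative; return value only).

-- ===== PORT A =====
-- inner 'for j, t in g[i]' scan of the popped vertex i (early return None = conflict)
def solveScanA (i : Int) (arcs : List (Int × Int)) (a : List Int) (dq : List Int)
    (k c : Int) : Option (List Int × List Int × Int × Int) :=
  match arcs with
  | [] => some (a, dq, k, c)
  | (j, t) :: rest =>
    if PySem.List.pyGetD a j (-1) ≥ 0 then
      if PySem.List.pyGetD a j (-1) ≠ PySem.Int.bxor (PySem.List.pyGetD a i (-1)) t then none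
      else solveScanA i rest a dq k c
    else
      solveScanA i rest
        (PySem.List.pySetD a j (PySem.Int.bxor (PySem.List.pyGetD a i (-1)) t))
        (j :: dq) (k + 1) (c + PySem.Int.bxor (PySem.List.pyGetD a i (-1)) t)

-- 'while dq:' loop; the stack dq is a cons-list (head = top); fuel is exhausted on no input satisfying Pre_
def solveLoopA (g : List (List (Int × Int))) : Nat → List Int → List Int → Int → Int →
    Option (List Int × Int × Int)
  | _, a, [], k, c => some (a, k, c)
  | 0, _, _ :: _, _, _ => none
  | fuel + 1, a, i :: rest, k, c =>
    match solveScanA i (PySem.List.pyGetD g i []) a rest k c with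
    | none => none
    | some (a', dq', k', c') => solveLoopA g fuel a' dq' k' c'

-- 'for i in range(n):' outer loop
def solveOuterA (g : List (List (Int × Int))) : List Int → List Int → Int → Int
  | [], _, ans => ans
  | i :: rest, a, ans =>
    if PySem.List.pyGetD a i (-1) < 0 then
      match solveLoopA g (2 * a.length + 1) (PySem.List.pySetD a i 0) [i] 1 0 with
      | none => -1
      | some (a', k, c) => solveOuterA g rest a' (ans + max c (k - c))
    else solveOuterA g rest a ans

def solve (n : Int) (m : Int) (g : List (List (Int × Int))) : Int :=
  solveOuterA g (PySem.List.pyRange 0 n 1) (List.replicate n.toNat (-1)) 0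

-- ===== PORT B =====
-- inner 'for v, t in g[u]' scan of the frontier vertex u
def solveScanB (u : Int) (arcs : List (Int × Int)) (color : List Int)
    (comp nxt : List Int) : Option (List Int × List Int × List Int) :=
  match arcs with
  | [] => some (color, comp, nxt)
  | (v, t) :: rest =>
    let w := PySem.Int.bxor (PySem.List.pyGetD color u (-1)) t
    if PySem.List.pyGetD color v (-1) ≥ 0 then
      if PySem.List.pyGetD color v (-1) ≠ w then none
      else solveScanB u rest color comp nxt
    else
      solveScanB u rest (PySem.List.pySetD color v w) (comp ++ [v]) (nxt ++ [v])

-- 'for u in frontier:' one BFS layer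
def solveLayerB (g : List (List (Int × Int))) : List Int → List Int → List Int → List Int →
    Option (List Int × List Int × List Int)
  | [], color, comp, nxt => some (color, comp, nxt)
  | u :: rest, color, comp, nxt =>
    match solveScanB u (PySem.List.pyGetD g u []) color comp nxt with
    | none => none
    | some (color', comp', nxt') => solveLayerB g rest color' comp' nxt'

-- 'while frontier:' loop over layers; fuel is exhausted on no input satisfying Pre_
def solveWhileB (g : List (List (Int × Int))) : Nat → List Int → List Int → List Int →
    Option (List Int × List Int)
  | _, color, comp, [] => some (color, comp)
  | 0, _, _, _ :: _ => none
  | fuel + 1, color, comp, frontier =>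
    match solveLayerB g frontier color comp [] with
    | none => none
    | some (color', comp', nxt') => solveWhileB g fuel color' comp' nxt'

-- 'for s in range(n):' outer loop
def solveOuterB (g : List (List (Int × Int))) : List Int → List Int → Int → Int
  | [], _, total => total
  | s :: rest, color, total =>
    if PySem.List.pyGetD color s (-1) ≥ 0 then solveOuterB g rest color total
    else
      match solveWhileB g (color.length + 1) (PySem.List.pySetD color s 0) [s] [s] with
      | none => -1
      | some (color', comp) =>
        let ones := (comp.map (fun v => PySem.List.pyGetD color' v (-1))).sum
        solveOuterB g rest color' (total + max ones ((comp.length : Int) - ones))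

def solve_alt (n : Int) (m : Int) (g : List (List (Int × Int))) : Int :=
  solveOuterB g (PySem.List.pyRange 0 n 1) (List.replicate n.toNat (-1)) 0

-- ===== PRECONDITION & SPEC =====
-- Pre_ requires well-formed instances for positive n (at least n adjacency rows, every
-- target in [0,n), every parity nonnegative): outside it A may raise IndexError, diverge
-- (a negative parity yields negative colours that are recoloured forever), or silently
-- wrap a negative vertex index — an accident of Python list indexing.
def Pre_solve (n : Int) (m : Int) (g : List (List (Int × Int))) : Prop :=
  0 < n → (n ≤ (g.length : Int) ∧
    ∀ arcs ∈ g.take n.toNat, ∀ p ∈ arcs, 0 ≤ p.1 ∧ p.1 < n ∧ 0 ≤ p.2)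
instance (n : Int) (m : Int) (g : List (List (Int × Int))) : Decidable (Pre_solve n m g) := by
  unfold Pre_solve; infer_instance

def pvWitness_solve : Int × Int × (List (List (Int × Int))) :=
  (3, 2, [[(1, 1)], [(0, 1), (2, 0)], [(1, 0)]])

def Spec_solve (n : Int) (m : Int) (g : List (List (Int × Int))) (out : Int) : Prop := out = solve_alt n m g
instance (n : Int) (m : Int) (g : List (List (Int × Int))) (out : Int) : Decidable (Spec_solve n m g out) := by unfold Spec_solve; infer_instance

-- ===== CLAIM (what is proved, stated in full; the proofs are below) =====
def Claim_equal_solve : Prop := ∀ (n : Int) (m : Int) (g : List (List (Int × Int))), Dom_solve n m g → Pre_solve n m g → Spec_solve n m g (solve n m g)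

-- ===== LEMMAS AND PROOFS =====

-- proof-side shorthands for the two PySem accesses the ports make
def pvRd (a : List Int) (v : Int) : Int := PySem.List.pyGetD a v (-1)
def pvAdj (g : List (List (Int × Int))) (u : Int) : List (Int × Int) := PySem.List.pyGetD g u []

-- well-formed instance (consequence of Dom/Pre used throughout)
def pvWF (n : Int) (g : List (List (Int × Int))) : Prop :=
  0 ≤ n ∧ n ≤ (g.length : Int) ∧
    ∀ u : Int, 0 ≤ u → u < n → ∀ p ∈ pvAdj g u, 0 ≤ p.1 ∧ p.1 < n ∧ 0 ≤ p.2

-- colour array invariant between components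
def pvA0 (n : Int) (a : List Int) : Prop :=
  (a.length : Int) = n ∧ ∀ v, 0 ≤ v → v < n → pvRd a v = -1 ∨ 0 ≤ pvRd a v

-- one step of colour propagation from u to an uncoloured v
def pvStep (g : List (List (Int × Int))) (a0 : List Int) (u v : Int) : Prop :=
  ∃ t, (v, t) ∈ pvAdj g u ∧ pvRd a0 v = -1
def pvReach (g : List (List (Int × Int))) (a0 : List Int) (s v : Int) : Prop :=
  Relation.ReflTransGen (pvStep g a0) s v

-- (C, ℓ): the component of seed s in colouring a0, with its unique consistent labelling
def pvIsComp (n : Int) (g : List (List (Int × Int))) (a0 : List Int) (s : Int)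
    (C : Finset Int) (l : Int → Int) : Prop :=
  s ∈ C ∧ l s = 0 ∧
  (∀ v ∈ C, 0 ≤ v ∧ v < n ∧ pvRd a0 v = -1 ∧ 0 ≤ l v ∧ pvReach g a0 s v) ∧
  (∀ u ∈ C, ∀ p ∈ pvAdj g u,
    (pvRd a0 p.1 = -1 → p.1 ∈ C ∧ l p.1 = PySem.Int.bxor (l u) p.2) ∧
    (pvRd a0 p.1 ≠ -1 → pvRd a0 p.1 = PySem.Int.bxor (l u) p.2))

-- a equals a0 overwritten by l on C
def pvOver (a0 : List Int) (C : Finset Int) (l : Int → Int) (a : List Int) : Prop :=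
  a.length = a0.length ∧
    ∀ v : Int, 0 ≤ v → v < (a0.length : Int) →
      pvRd a v = if v ∈ C then l v else pvRd a0 v

-- u's arc list fully expanded (membership form, for the forward lemmas)
def pvExpM (g : List (List (Int × Int))) (a0 : List Int) (V : Finset Int) (u : Int) : Prop :=
  ∀ p ∈ pvAdj g u, pvRd a0 p.1 = -1 → p.1 ∈ V

-- u's arc list fully expanded (value form, for the backward lemmas)
def pvExp (g : List (List (Int × Int))) (a a0 : List Int) (V : Finset Int) (u : Int) : Prop :=
  ∀ p ∈ pvAdj g u, (pvRd a0 p.1 = -1 → p.1 ∈ V) ∧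
    pvRd a p.1 = PySem.Int.bxor (pvRd a u) p.2

-- mid-run colouring state (backward lemmas)
def pvInvB (n : Int) (g : List (List (Int × Int))) (a0 : List Int) (s : Int)
    (V : Finset Int) (a : List Int) : Prop :=
  a.length = a0.length ∧ s ∈ V ∧ pvRd a s = 0 ∧
  (∀ v ∈ V, 0 ≤ v ∧ v < n ∧ pvRd a0 v = -1 ∧ 0 ≤ pvRd a v ∧ pvReach g a0 s v) ∧
  (∀ v, 0 ≤ v → v < n → v ∉ V → pvRd a v = pvRd a0 v)

lemma pvRd_set (a : List Int) (j v x : Int) (hj0 : 0 ≤ j) (hj : j < (a.length : Int))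
    (hx0 : 0 ≤ x) (hx : x < (a.length : Int)) :
    pvRd (PySem.List.pySetD a j v) x = if x = j then v else pvRd a x := by
  unfold pvRd
  rw [PySem.List.pySetD_of_nonneg a v hj0]
  have hx' : x < (((a.set j.toNat v).length : Nat) : Int) := by simpa using hx
  rw [PySem.List.pyGetD_eq_getElem _ _ hx0 hx']
  rw [PySem.List.pyGetD_eq_getElem a _ hx0 hx]
  rw [List.getElem_set]
  by_cases h : x = j
  · have : j.toNat = x.toNat := by omega
    simp [h, this]
  · have : ¬ (j.toNat = x.toNat) := by omega
    simp [h, this]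

lemma pvRd_nat (a : List Int) (i : Nat) (h : i < a.length) : pvRd a (i : Int) = a[i] := by
  unfold pvRd
  rw [PySem.List.pyGetD_natCast]
  simp [List.getD_eq_getElem?_getD, List.getElem?_eq_getElem h]

lemma pvBxor_nonneg {x t : Int} (hx : 0 ≤ x) (ht : 0 ≤ t) : 0 ≤ PySem.Int.bxor x t := by
  rw [PySem.Int.bxor_of_nonneg hx ht]
  exact Int.natCast_nonneg _

lemma pvCard_le (C : Finset Int) (n : Int) (h : ∀ v ∈ C, 0 ≤ v ∧ v < n) :
    C.card ≤ n.toNat := by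
  have : C ⊆ Finset.Icc 0 (n - 1) := by
    intro v hv
    have := h v hv
    simp only [Finset.mem_Icc]
    omega
  calc C.card ≤ (Finset.Icc (0 : Int) (n - 1)).card := Finset.card_le_card this
    _ = n.toNat := by rw [Int.card_Icc]; congr 1; omega

lemma pvOver_eq {a0 : List Int} {C : Finset Int} {l : Int → Int} {x y : List Int}
    (hx : pvOver a0 C l x) (hy : pvOver a0 C l y) : x = y := by
  obtain ⟨hlx, hvx⟩ := hx
  obtain ⟨hly, hvy⟩ := hy
  apply List.ext_getElem (by omega)
  intro i h1 h2
  have hi : i < a0.length := by omega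
  have e1 := pvRd_nat x i h1
  have e2 := pvRd_nat y i h2
  have b1 := hvx (i : Int) (by positivity) (by exact_mod_cast hi)
  have b2 := hvy (i : Int) (by positivity) (by exact_mod_cast hi)
  rw [e1] at b1; rw [e2] at b2
  rw [b1, b2]

-- reachability closure: a fully expanded visited set absorbs everything reachable
lemma pvReach_closed {g : List (List (Int × Int))} {a0 : List Int} {s : Int}
    {V : Finset Int} (hs : s ∈ V) (hexp : ∀ u ∈ V, pvExpM g a0 V u) :
    ∀ v, pvReach g a0 s v → v ∈ V := by
  intro v hv
  induction hv with
  | refl => exact hs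
  | tail h1 h2 ih =>
    obtain ⟨t, hmem, hun⟩ := h2
    exact hexp _ ih _ hmem hun

-- ===== forward lemmas for port A =====
lemma pvScanA_fwd {n : Int} {g : List (List (Int × Int))} {a0 : List Int} {s : Int}
    {C : Finset Int} {l : Int → Int}
    (hwf : pvWF n g) (h0 : pvA0 n a0) (hC : pvIsComp n g a0 s C l) {u : Int} (hu : u ∈ C) :
    ∀ (L : List (Int × Int)), (∀ p ∈ L, p ∈ pvAdj g u) →
    ∀ (V : Finset Int) (a : List Int) (dq : List Int),
      V ⊆ C → u ∈ V → pvOver a0 V l a → (∀ x ∈ dq, x ∈ V) → dq.Nodup →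
    ∃ (V' : Finset Int) (a' : List Int) (dnew : List Int),
      V ⊆ V' ∧ V' ⊆ C ∧ pvOver a0 V' l a' ∧
      dnew.Nodup ∧ (∀ x ∈ dnew, x ∈ V' ∧ x ∉ V) ∧ (∀ x ∈ V', x ∉ V → x ∈ dnew) ∧
      (∀ p ∈ L, pvRd a0 p.1 = -1 → p.1 ∈ V') ∧
      dnew.length + V.card = V'.card ∧
      solveScanA u L a dq (V.card : Int) (∑ v ∈ V, l v) =
        some (a', dnew ++ dq, (V'.card : Int), ∑ v ∈ V', l v) := by
  intro L
  induction L with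
  | nil =>
    intro _ V a dq hVC huV hov hdq hnd
    exact ⟨V, a, [], Finset.Subset.refl _, hVC, hov, List.nodup_nil, by simp, by tauto,
      by simp, by simp, by simp [solveScanA]⟩
  | cons p rest ih =>
    intro hL V a dq hVC huV hov hdq hnd
    obtain ⟨j, t⟩ := p
    have hpmem : ((j, t) : Int × Int) ∈ pvAdj g u := hL _ (by simp)
    obtain ⟨hu0, hun, hua0, hlu01, _⟩ := hC.2.2.1 u hu
    obtain ⟨hj0, hjn, ht01⟩ := hwf.2.2 u hu0 hun (j, t) hpmem
    have hlen : a.length = a0.length := hov.1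
    have hlenn : (a0.length : Int) = n := h0.1
    have hlena : (a.length : Int) = n := by rw [hlen]; exact hlenn
    have rdu : PySem.List.pyGetD a u (-1) = l u := by
      have := hov.2 u hu0 (by omega)
      rw [if_pos huV] at this
      exact this
    have rdj0 : pvRd a j = if j ∈ V then l j else pvRd a0 j :=
      hov.2 j hj0 (by omega)
    have hclose := hC.2.2.2 u hu (j, t) hpmem
    by_cases hjV : j ∈ V
    · -- already coloured in this component: consistency check passes
      have hjC : j ∈ C := hVC hjV
      obtain ⟨_, _, hja0, hlj01, _⟩ := hC.2.2.1 j hjC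
      have hlj : l j = PySem.Int.bxor (l u) t := (hclose.1 hja0).2
      have rdj : PySem.List.pyGetD a j (-1) = l j := by
        have := rdj0; rw [if_pos hjV] at this; exact this
      have hge : PySem.List.pyGetD a j (-1) ≥ 0 := by rw [rdj]; omega
      obtain ⟨V', a', dnew, h1, h2, h3, h4, h5, h6, h7, h8, h9⟩ :=
        ih (fun q hq => hL q (by simp [hq])) V a dq hVC huV hov hdq hnd
      refine ⟨V', a', dnew, h1, h2, h3, h4, h5, h6, ?_, h8, ?_⟩
      · intro q hq
        rcases List.mem_cons.mp hq with h | h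
        · subst h; intro _; exact h1 (by exact hjV)
        · exact h7 q h
      · simp only [solveScanA]
        rw [if_pos hge, rdj, rdu, hlj, if_neg (by simp)]
        exact h9
    · by_cases hja0 : pvRd a0 j = -1
      · -- newly coloured: push j
        obtain ⟨hjC, hlj⟩ := hclose.1 hja0
        have rdj : PySem.List.pyGetD a j (-1) = -1 := by
          have := rdj0; rw [if_neg hjV] at this; unfold pvRd at this; rw [this]; exact hja0
        have hlt : ¬ (PySem.List.pyGetD a j (-1) ≥ 0) := by rw [rdj]; omega
        have hval : PySem.Int.bxor (PySem.List.pyGetD a u (-1)) t = l j := by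
          rw [rdu, ← hlj]
        -- new state
        set a1 := PySem.List.pySetD a j (PySem.Int.bxor (PySem.List.pyGetD a u (-1)) t) with ha1
        have hlen1 : a1.length = a0.length := by rw [ha1, PySem.List.length_pySetD, hlen]
        have hov1 : pvOver a0 (insert j V) l a1 := by
          refine ⟨hlen1, ?_⟩
          intro v hv0 hvn
          rw [ha1, pvRd_set a j _ v hj0 (by omega) hv0 (by omega)]
          by_cases hvj : v = j
          · subst hvj; rw [if_pos rfl, if_pos (Finset.mem_insert_self _ _), hval]
          · rw [if_neg hvj]
            have := hov.2 v hv0 hvn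
            rw [this]
            by_cases hvV : v ∈ V
            · rw [if_pos hvV, if_pos (Finset.mem_insert_of_mem hvV)]
            · rw [if_neg hvV, if_neg (by simp [hvj, hvV])]
        have hjdq : j ∉ dq := fun h => hjV (hdq j h)
        obtain ⟨V', a', dnew, h1, h2, h3, h4, h5, h6, h7, h8, h9⟩ :=
          ih (fun q hq => hL q (by simp [hq])) (insert j V) a1 (j :: dq)
            (Finset.insert_subset hjC hVC) (Finset.mem_insert_of_mem huV) hov1
            (by intro x hx; rcases List.mem_cons.mp hx with h | h
                · subst h; exact Finset.mem_insert_self _ _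
                · exact Finset.mem_insert_of_mem (hdq x h))
            (List.nodup_cons.mpr ⟨hjdq, hnd⟩)
        have hjV' : j ∈ V' := h1 (Finset.mem_insert_self _ _)
        refine ⟨V', a', dnew ++ [j], Finset.Subset.trans (Finset.subset_insert _ _) h1, h2, h3,
          ?_, ?_, ?_, ?_, ?_, ?_⟩
        · rw [List.nodup_append]
          refine ⟨h4, List.nodup_singleton _, ?_⟩
          intro x hx b hb
          simp only [List.mem_singleton] at hb
          subst hb
          exact fun hxj => (h5 x hx).2 (by rw [hxj]; exact Finset.mem_insert_self _ _)
        · intro x hx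
          rcases List.mem_append.mp hx with h | h
          · exact ⟨(h5 x h).1, fun hv => (h5 x h).2 (Finset.mem_insert_of_mem hv)⟩
          · simp only [List.mem_singleton] at h; subst h; exact ⟨hjV', hjV⟩
        · intro x hxV' hxV
          by_cases hxj : x = j
          · simp [hxj]
          · have := h6 x hxV' (by simp [hxj, hxV])
            simp [this]
        · intro q hq
          rcases List.mem_cons.mp hq with h | h
          · subst h; intro _; exact hjV'
          · exact h7 q h
        · have hcard : (insert j V).card = V.card + 1 := Finset.card_insert_of_notMem hjV
          simp only [List.length_append, List.length_singleton]
          omega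
        · simp only [solveScanA]
          rw [if_neg hlt]
          have e1 : (V.card : Int) + 1 = ((insert j V).card : Int) := by
            rw [Finset.card_insert_of_notMem hjV]; push_cast; ring
          have e2 : (∑ v ∈ V, l v) + PySem.Int.bxor (PySem.List.pyGetD a u (-1)) t
              = ∑ v ∈ insert j V, l v := by
            rw [hval, Finset.sum_insert hjV]; ring
          rw [e1, e2]
          rw [h9]
          congr 1
          simp
      · -- coloured before this component: consistency check passes
        have hja1 : pvRd a0 j = PySem.Int.bxor (l u) t := hclose.2 hja0
        have rdj : PySem.List.pyGetD a j (-1) = pvRd a0 j := by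
          have := rdj0; rw [if_neg hjV] at this; exact this
        have h01 : 0 ≤ pvRd a0 j := by
          rcases h0.2 j hj0 hjn with h | h
          · exact absurd h hja0
          · exact h
        have hge : PySem.List.pyGetD a j (-1) ≥ 0 := by rw [rdj]; omega
        obtain ⟨V', a', dnew, h1, h2, h3, h4, h5, h6, h7, h8, h9⟩ :=
          ih (fun q hq => hL q (by simp [hq])) V a dq hVC huV hov hdq hnd
        refine ⟨V', a', dnew, h1, h2, h3, h4, h5, h6, ?_, h8, ?_⟩
        · intro q hq
          rcases List.mem_cons.mp hq with h | h
          · subst h; intro hc; exact absurd hc hja0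
          · exact h7 q h
        · simp only [solveScanA]
          rw [if_pos hge, rdj, rdu, ← hja1, if_neg (by simp)]
          exact h9

lemma pvVC {n : Int} {g : List (List (Int × Int))} {a0 : List Int} {s : Int}
    {C : Finset Int} {l : Int → Int} (hC : pvIsComp n g a0 s C l)
    {V : Finset Int} (hVC : V ⊆ C) (hsV : s ∈ V) (hexp : ∀ u ∈ V, pvExpM g a0 V u) :
    V = C :=
  Finset.Subset.antisymm hVC
    (fun v hv => pvReach_closed hsV hexp v ((hC.2.2.1 v hv).2.2.2.2))

lemma pvLoopA_fwd {n : Int} {g : List (List (Int × Int))} {a0 : List Int} {s : Int}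
    {C : Finset Int} {l : Int → Int}
    (hwf : pvWF n g) (h0 : pvA0 n a0) (hC : pvIsComp n g a0 s C l) :
    ∀ (fuel : Nat) (V : Finset Int) (a dq : List Int),
      V ⊆ C → s ∈ V → pvOver a0 V l a → (∀ x ∈ dq, x ∈ V) → dq.Nodup →
      (∀ u ∈ V, u ∉ dq → pvExpM g a0 V u) →
      dq.length + 2 * (C.card - V.card) ≤ fuel →
      ∃ a', pvOver a0 C l a' ∧
        solveLoopA g fuel a dq (V.card : Int) (∑ v ∈ V, l v) =
          some (a', (C.card : Int), ∑ v ∈ C, l v) := by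
  intro fuel
  induction fuel with
  | zero =>
    intro V a dq hVC hsV hov hdq hnd hexp hfuel
    match dq, hdq, hnd, hexp, hfuel with
    | [], _, _, hexp, _ =>
      have hVC' : V = C := pvVC hC hVC hsV (fun u hu => hexp u hu (by simp))
      subst hVC'
      exact ⟨a, hov, by simp [solveLoopA]⟩
    | (i :: rest), _, _, _, hfuel => simp at hfuel
  | succ f ih =>
    intro V a dq hVC hsV hov hdq hnd hexp hfuel
    match dq, hdq, hnd, hexp, hfuel with
    | [], _, _, hexp, _ =>
      have hVC' : V = C := pvVC hC hVC hsV (fun u hu => hexp u hu (by simp))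
      subst hVC'
      exact ⟨a, hov, by simp [solveLoopA]⟩
    | (i :: rest), hdq, hnd, hexp, hfuel =>
      have hiV : i ∈ V := hdq i (by simp)
      have hiC : i ∈ C := hVC hiV
      obtain ⟨V', a', dnew, h1, h2, h3, h4, h5, h6, h7, h8, h9⟩ :=
        pvScanA_fwd hwf h0 hC hiC (pvAdj g i) (fun p hp => hp) V a rest hVC hiV hov
          (fun x hx => hdq x (by simp [hx])) (List.nodup_cons.mp hnd).2
      have hrw : PySem.List.pyGetD g i [] = pvAdj g i := rfl
      obtain ⟨a'', h10, h11⟩ := ih V' a' (dnew ++ rest) h2 (h1 hsV) h3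
        (by intro x hx
            rcases List.mem_append.mp hx with h | h
            · exact (h5 x h).1
            · exact h1 (hdq x (by simp [h])))
        (by rw [List.nodup_append]
            refine ⟨h4, (List.nodup_cons.mp hnd).2, ?_⟩
            intro x hx b hb
            exact fun hxb => (h5 x hx).2 (by rw [hxb]; exact hdq b (by simp [hb])))
        (by intro u' hu' hu'dq
            by_cases hui : u' = i
            · subst hui
              intro p hp hp0
              exact h7 p hp hp0
            · by_cases huV : u' ∈ V
              · have : u' ∉ (i :: rest) := by
                  simp only [List.mem_cons]
                  push_neg
                  exact ⟨hui, fun h => hu'dq (List.mem_append.mpr (Or.inr h))⟩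
                intro p hp hp0
                exact h1 (hexp u' huV this p hp hp0)
              · exact absurd (List.mem_append.mpr (Or.inl (h6 u' hu' huV))) hu'dq)
        (by have c1 : V.card ≤ V'.card := Finset.card_le_card h1
            have c2 : V'.card ≤ C.card := Finset.card_le_card h2
            simp only [List.length_append, List.length_cons] at hfuel ⊢
            omega)
      refine ⟨a'', h10, ?_⟩
      simp only [solveLoopA, hrw, h9]
      exact h11

-- ===== backward lemmas for port A =====
lemma pvExp_mono {n : Int} {g : List (List (Int × Int))} {a0 : List Int} {s : Int}
    {V V' : Finset Int} {a a' : List Int}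
    (hwf : pvWF n g) (hinv : pvInvB n g a0 s V a) (hVV' : V ⊆ V')
    (hpres : ∀ x, 0 ≤ x → x < n → pvRd a x ≠ -1 → pvRd a' x = pvRd a x)
    {u : Int} (hu : u ∈ V) (he : pvExp g a a0 V u) : pvExp g a' a0 V' u := by
  intro p hp
  obtain ⟨hu0, hun, _, hval, _⟩ := hinv.2.2.2.1 u hu
  obtain ⟨hp0, hpn, ht⟩ := hwf.2.2 u hu0 hun p hp
  obtain ⟨hmem, hveq⟩ := he p hp
  have hu' : pvRd a' u = pvRd a u := hpres u hu0 hun (by omega)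
  have hv01 : 0 ≤ pvRd a p.1 := by rw [hveq]; exact pvBxor_nonneg hval ht
  have hp' : pvRd a' p.1 = pvRd a p.1 := hpres p.1 hp0 hpn (by omega)
  exact ⟨fun h => hVV' (hmem h), by rw [hp', hu', hveq]⟩

lemma pvScanA_bwd {n : Int} {g : List (List (Int × Int))} {a0 : List Int} {s : Int}
    (hwf : pvWF n g) (h0 : pvA0 n a0) {u : Int} :
    ∀ (L : List (Int × Int)), (∀ p ∈ L, p ∈ pvAdj g u) →
    ∀ (V : Finset Int) (a dq : List Int) (k c : Int) (res : List Int × List Int × Int × Int),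
      pvInvB n g a0 s V a → u ∈ V → (∀ x ∈ dq, x ∈ V) →
      solveScanA u L a dq k c = some res →
      ∃ V', V ⊆ V' ∧ pvInvB n g a0 s V' res.1 ∧
        (∀ x ∈ res.2.1, x ∈ V') ∧ (∀ x ∈ dq, x ∈ res.2.1) ∧
        (∀ x ∈ V', x ∉ V → x ∈ res.2.1) ∧
        (∀ x, 0 ≤ x → x < n → pvRd a x ≠ -1 → pvRd res.1 x = pvRd a x) ∧
        (∀ p ∈ L, (pvRd a0 p.1 = -1 → p.1 ∈ V') ∧
          pvRd res.1 p.1 = PySem.Int.bxor (pvRd res.1 u) p.2) := by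
  intro L
  induction L with
  | nil =>
    intro _ V a dq k c res hinv huV hdq hres
    simp only [solveScanA, Option.some.injEq] at hres
    subst hres
    exact ⟨V, Finset.Subset.refl _, hinv, hdq, fun x hx => hx, by tauto,
      fun x _ _ _ => rfl, by simp⟩
  | cons p rest ih =>
    intro hL V a dq k c res hinv huV hdq hres
    obtain ⟨j, t⟩ := p
    have hpmem : ((j, t) : Int × Int) ∈ pvAdj g u := hL _ (by simp)
    obtain ⟨hu0, hun, hua0, hau01, hureach⟩ := hinv.2.2.2.1 u huV
    obtain ⟨hj0, hjn, ht01⟩ := hwf.2.2 u hu0 hun (j, t) hpmem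
    simp only at hj0 hjn ht01
    have hlen : a.length = a0.length := hinv.1
    have hlenn : (a0.length : Int) = n := h0.1
    have hlena : (a.length : Int) = n := by rw [hlen]; exact hlenn
    have hau01 : 0 ≤ PySem.List.pyGetD a u (-1) := hau01
    simp only [solveScanA] at hres
    by_cases hge : PySem.List.pyGetD a j (-1) ≥ 0
    · rw [if_pos hge] at hres
      by_cases hne : PySem.List.pyGetD a j (-1) ≠ PySem.Int.bxor (PySem.List.pyGetD a u (-1)) t
      · rw [if_pos hne] at hres
        exact absurd hres (by simp)
      · rw [if_neg hne] at hres
        push_neg at hne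
        obtain ⟨V', h1, h2, h3, h4, h5, h6, h7⟩ :=
          ih (fun q hq => hL q (by simp [hq])) V a dq k c res hinv huV hdq hres
        refine ⟨V', h1, h2, h3, h4, h5, h6, ?_⟩
        intro q hq
        rcases List.mem_cons.mp hq with h | h
        · subst h
          constructor
          · intro ha0j
            have ha0j' : pvRd a0 j = -1 := ha0j
            by_cases hjV : j ∈ V
            · exact h1 hjV
            · exfalso
              have hjout := hinv.2.2.2.2 j hj0 hjn hjV
              unfold pvRd at hjout ha0j'
              rw [ha0j'] at hjout
              omega
          · have hju : pvRd res.1 j = pvRd a j := by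
              apply h6 j hj0 hjn
              unfold pvRd
              omega
            have huu : pvRd res.1 u = pvRd a u := by
              apply h6 u hu0 hun
              unfold pvRd
              omega
            unfold pvRd at hju huu ⊢
            rw [hju, huu]
            exact hne
        · exact h7 q h
    · rw [if_neg hge] at hres
      push_neg at hge
      have hjV : j ∉ V := by
        intro h
        obtain ⟨_, _, _, hv, _⟩ := hinv.2.2.2.1 j h
        unfold pvRd at hv
        omega
      have haj : PySem.List.pyGetD a j (-1) = PySem.List.pyGetD a0 j (-1) :=
        hinv.2.2.2.2 j hj0 hjn hjV
      have ha0j : pvRd a0 j = -1 := by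
        unfold pvRd
        rcases h0.2 j hj0 hjn with h | h <;> unfold pvRd at h <;> omega
      have hw01 : 0 ≤ PySem.Int.bxor (PySem.List.pyGetD a u (-1)) t := pvBxor_nonneg hau01 ht01
      obtain ⟨hs0, hsn, _⟩ := hinv.2.2.2.1 s hinv.2.1
      have hsj : s ≠ j := by
        intro h
        have := hinv.2.2.1
        unfold pvRd at this
        rw [h] at this
        omega
      have hset : ∀ x : Int, 0 ≤ x → x < n →
          pvRd (PySem.List.pySetD a j (PySem.Int.bxor (PySem.List.pyGetD a u (-1)) t)) x =
            if x = j then PySem.Int.bxor (PySem.List.pyGetD a u (-1)) t else pvRd a x := by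
        intro x hx0 hxn
        exact pvRd_set a j _ x hj0 (by omega) hx0 (by omega)
      have hinv1 : pvInvB n g a0 s (insert j V)
          (PySem.List.pySetD a j (PySem.Int.bxor (PySem.List.pyGetD a u (-1)) t)) := by
        refine ⟨by rw [PySem.List.length_pySetD]; exact hlen, Finset.mem_insert_of_mem hinv.2.1, ?_, ?_, ?_⟩
        · rw [hset s hs0 hsn, if_neg hsj]
          exact hinv.2.2.1
        · intro v hv
          rcases Finset.mem_insert.mp hv with h | h
          · rw [h]
            refine ⟨hj0, hjn, ha0j, ?_, ?_⟩
            · rw [hset j hj0 hjn, if_pos rfl]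
              exact hw01
            · exact Relation.ReflTransGen.tail hureach ⟨t, hpmem, ha0j⟩
          · obtain ⟨h1', h2', h3', h4', h5'⟩ := hinv.2.2.2.1 v h
            refine ⟨h1', h2', h3', ?_, h5'⟩
            rw [hset v h1' h2', if_neg (by intro e; subst e; exact hjV h)]
            exact h4'
        · intro v hv0 hvn hv
          rw [hset v hv0 hvn, if_neg (by intro e; subst e; exact hv (Finset.mem_insert_self _ _))]
          exact hinv.2.2.2.2 v hv0 hvn (fun h => hv (Finset.mem_insert_of_mem h))
      obtain ⟨V', h1, h2, h3, h4, h5, h6, h7⟩ :=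
        ih (fun q hq => hL q (by simp [hq])) (insert j V)
          (PySem.List.pySetD a j (PySem.Int.bxor (PySem.List.pyGetD a u (-1)) t))
          (j :: dq) (k + 1) (c + PySem.Int.bxor (PySem.List.pyGetD a u (-1)) t) res hinv1
          (Finset.mem_insert_of_mem huV)
          (by intro x hx
              rcases List.mem_cons.mp hx with h | h
              · subst h; exact Finset.mem_insert_self _ _
              · exact Finset.mem_insert_of_mem (hdq x h))
          hres
      have hjres : j ∈ res.2.1 := h4 j (by simp)
      have hpres : ∀ x, 0 ≤ x → x < n → pvRd a x ≠ -1 → pvRd res.1 x = pvRd a x := by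
        intro x hx0 hxn hxc
        have hxj : x ≠ j := by
          intro e
          apply hxc
          rw [e]
          unfold pvRd
          rw [haj]
          exact ha0j
        have e1 : pvRd (PySem.List.pySetD a j (PySem.Int.bxor (PySem.List.pyGetD a u (-1)) t)) x
            = pvRd a x := by rw [hset x hx0 hxn, if_neg hxj]
        rw [← e1]
        apply h6 x hx0 hxn
        rw [e1]
        exact hxc
      refine ⟨V', Finset.Subset.trans (Finset.subset_insert _ _) h1, h2, h3,
        (fun x hx => h4 x (by simp [hx])), ?_, hpres, ?_⟩
      · intro x hxV' hxV
        by_cases hxj : x = j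
        · subst hxj; exact hjres
        · exact h5 x hxV' (by simp [hxj, hxV])
      · intro q hq
        rcases List.mem_cons.mp hq with h | h
        · subst h
          refine ⟨fun _ => h1 (Finset.mem_insert_self _ _), ?_⟩
          have e1 : pvRd (PySem.List.pySetD a j (PySem.Int.bxor (PySem.List.pyGetD a u (-1)) t)) j
              = PySem.Int.bxor (PySem.List.pyGetD a u (-1)) t := by rw [hset j hj0 hjn, if_pos rfl]
          have e2 : pvRd (PySem.List.pySetD a j (PySem.Int.bxor (PySem.List.pyGetD a u (-1)) t)) u
              = pvRd a u := by
            rw [hset u hu0 hun, if_neg (by intro e; subst e; exact hjV huV)]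
          have hju : pvRd res.1 j = PySem.Int.bxor (PySem.List.pyGetD a u (-1)) t := by
            rw [← e1]
            apply h6 j hj0 hjn
            rw [e1]
            omega
          have huu : pvRd res.1 u = pvRd a u := by
            rw [← e2]
            apply h6 u hu0 hun
            rw [e2]
            unfold pvRd
            omega
          rw [hju, huu]
          rfl
        · exact h7 q h

lemma pvInvB_isComp {n : Int} {g : List (List (Int × Int))} {a0 : List Int} {s : Int}
    {V : Finset Int} {a : List Int} (hwf : pvWF n g) (h0 : pvA0 n a0)
    (hinv : pvInvB n g a0 s V a) (hexp : ∀ u ∈ V, pvExp g a a0 V u) :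
    pvIsComp n g a0 s V (fun v => pvRd a v) := by
  obtain ⟨hlen, hsV, hs0, hmem, hout⟩ := hinv
  refine ⟨hsV, hs0, fun v hv => hmem v hv, ?_⟩
  intro u hu p hp
  obtain ⟨h1, h2, _, _, _⟩ := hmem u hu
  obtain ⟨hp0, hpn, _⟩ := hwf.2.2 u h1 h2 p hp
  obtain ⟨hm, hv⟩ := hexp u hu p hp
  constructor
  · intro ha0
    exact ⟨hm ha0, hv⟩
  · intro ha0
    have hpV : p.1 ∉ V := fun h => ha0 (hmem p.1 h).2.2.1
    rw [← hout p.1 hp0 hpn hpV]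
    exact hv

lemma pvLoopA_bwd {n : Int} {g : List (List (Int × Int))} {a0 : List Int} {s : Int}
    (hwf : pvWF n g) (h0 : pvA0 n a0) :
    ∀ (fuel : Nat) (V : Finset Int) (a dq : List Int) (k c : Int) (res : List Int × Int × Int),
      pvInvB n g a0 s V a → (∀ x ∈ dq, x ∈ V) →
      (∀ u ∈ V, u ∉ dq → pvExp g a a0 V u) →
      solveLoopA g fuel a dq k c = some res →
      ∃ C l, pvIsComp n g a0 s C l := by
  intro fuel
  induction fuel with
  | zero =>
    intro V a dq k c res hinv hdq hexp hres
    match dq, hdq, hexp, hres with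
    | [], _, hexp, _ =>
      exact ⟨V, fun v => pvRd a v, pvInvB_isComp hwf h0 hinv (fun u hu => hexp u hu (by simp))⟩
    | (i :: rest), _, _, hres => simp [solveLoopA] at hres
  | succ f ih =>
    intro V a dq k c res hinv hdq hexp hres
    match dq, hdq, hexp, hres with
    | [], _, hexp, _ =>
      exact ⟨V, fun v => pvRd a v, pvInvB_isComp hwf h0 hinv (fun u hu => hexp u hu (by simp))⟩
    | (i :: rest), hdq, hexp, hres =>
      have hiV : i ∈ V := hdq i (by simp)
      simp only [solveLoopA] at hres
      cases hscan : solveScanA i (PySem.List.pyGetD g i []) a rest k c with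
      | none => rw [hscan] at hres; exact absurd hres (by simp)
      | some val =>
        obtain ⟨a1, dq1, k1, c1⟩ := val
        rw [hscan] at hres
        obtain ⟨V', h1, h2, h3, h4, h5, h6, h7⟩ :=
          pvScanA_bwd hwf h0 (pvAdj g i) (fun p hp => hp) V a rest k c (a1, dq1, k1, c1)
            hinv hiV (fun x hx => hdq x (by simp [hx])) hscan
        exact ih V' a1 dq1 k1 c1 res h2 h3
          (by intro u' hu' hu'dq
              by_cases hui : u' = i
              · subst hui
                intro p hp
                exact h7 p hp
              · by_cases huV : u' ∈ V
                · have hnin : u' ∉ (i :: rest) := by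
                    simp only [List.mem_cons]
                    push_neg
                    exact ⟨hui, fun h => hu'dq (h4 u' h)⟩
                  exact pvExp_mono hwf hinv h1 h6 huV (hexp u' huV hnin)
                · exact absurd (h5 u' hu' huV) hu'dq)
          hres

-- ===== forward lemmas for port B =====
lemma pvScanB_fwd {n : Int} {g : List (List (Int × Int))} {a0 : List Int} {s : Int}
    {C : Finset Int} {l : Int → Int}
    (hwf : pvWF n g) (h0 : pvA0 n a0) (hC : pvIsComp n g a0 s C l) {u : Int} (hu : u ∈ C) :
    ∀ (L : List (Int × Int)), (∀ p ∈ L, p ∈ pvAdj g u) →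
    ∀ (V : Finset Int) (a comp nxt : List Int),
      V ⊆ C → u ∈ V → pvOver a0 V l a →
    ∃ (V' : Finset Int) (a' : List Int) (dnew : List Int),
      V ⊆ V' ∧ V' ⊆ C ∧ pvOver a0 V' l a' ∧
      dnew.Nodup ∧ (∀ x ∈ dnew, x ∈ V' ∧ x ∉ V) ∧ (∀ x ∈ V', x ∉ V → x ∈ dnew) ∧
      (∀ p ∈ L, pvRd a0 p.1 = -1 → p.1 ∈ V') ∧
      dnew.length + V.card = V'.card ∧
      solveScanB u L a comp nxt = some (a', comp ++ dnew, nxt ++ dnew) := by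
  intro L
  induction L with
  | nil =>
    intro _ V a comp nxt hVC huV hov
    exact ⟨V, a, [], Finset.Subset.refl _, hVC, hov, List.nodup_nil, by simp, by tauto,
      by simp, by simp, by simp [solveScanB]⟩
  | cons p rest ih =>
    intro hL V a comp nxt hVC huV hov
    obtain ⟨j, t⟩ := p
    have hpmem : ((j, t) : Int × Int) ∈ pvAdj g u := hL _ (by simp)
    obtain ⟨hu0, hun, hua0, hlu01, _⟩ := hC.2.2.1 u hu
    obtain ⟨hj0, hjn, ht01⟩ := hwf.2.2 u hu0 hun (j, t) hpmem
    have hlen : a.length = a0.length := hov.1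
    have hlenn : (a0.length : Int) = n := h0.1
    have rdu : PySem.List.pyGetD a u (-1) = l u := by
      have := hov.2 u hu0 (by omega)
      rw [if_pos huV] at this
      exact this
    have rdj0 : pvRd a j = if j ∈ V then l j else pvRd a0 j :=
      hov.2 j hj0 (by omega)
    have hclose := hC.2.2.2 u hu (j, t) hpmem
    by_cases hjV : j ∈ V
    · have hjC : j ∈ C := hVC hjV
      obtain ⟨_, _, hja0, _, _⟩ := hC.2.2.1 j hjC
      have hlj : l j = PySem.Int.bxor (l u) t := (hclose.1 hja0).2
      have rdj : PySem.List.pyGetD a j (-1) = l j := by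
        have := rdj0; rw [if_pos hjV] at this; exact this
      have hge : PySem.List.pyGetD a j (-1) ≥ 0 := by
        rw [rdj]
        exact (hC.2.2.1 j hjC).2.2.2.1
      obtain ⟨V', a', dnew, h1, h2, h3, h4, h5, h6, h7, h8, h9⟩ :=
        ih (fun q hq => hL q (by simp [hq])) V a comp nxt hVC huV hov
      refine ⟨V', a', dnew, h1, h2, h3, h4, h5, h6, ?_, h8, ?_⟩
      · intro q hq
        rcases List.mem_cons.mp hq with h | h
        · subst h; intro _; exact h1 hjV
        · exact h7 q h
      · simp only [solveScanB]
        rw [if_pos hge, rdj, rdu, hlj, if_neg (by simp)]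
        exact h9
    · by_cases hja0 : pvRd a0 j = -1
      · obtain ⟨hjC, hlj⟩ := hclose.1 hja0
        have rdj : PySem.List.pyGetD a j (-1) = -1 := by
          have := rdj0; rw [if_neg hjV] at this; unfold pvRd at this; rw [this]; exact hja0
        have hlt : ¬ (PySem.List.pyGetD a j (-1) ≥ 0) := by rw [rdj]; omega
        have hval : PySem.Int.bxor (PySem.List.pyGetD a u (-1)) t = l j := by
          rw [rdu, ← hlj]
        set a1 := PySem.List.pySetD a j (PySem.Int.bxor (PySem.List.pyGetD a u (-1)) t) with ha1
        have hlen1 : a1.length = a0.length := by rw [ha1, PySem.List.length_pySetD, hlen]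
        have hov1 : pvOver a0 (insert j V) l a1 := by
          refine ⟨hlen1, ?_⟩
          intro v hv0 hvn
          rw [ha1, pvRd_set a j _ v hj0 (by omega) hv0 (by omega)]
          by_cases hvj : v = j
          · subst hvj; rw [if_pos rfl, if_pos (Finset.mem_insert_self _ _), hval]
          · rw [if_neg hvj]
            have := hov.2 v hv0 hvn
            rw [this]
            by_cases hvV : v ∈ V
            · rw [if_pos hvV, if_pos (Finset.mem_insert_of_mem hvV)]
            · rw [if_neg hvV, if_neg (by simp [hvj, hvV])]
        obtain ⟨V', a', dnew, h1, h2, h3, h4, h5, h6, h7, h8, h9⟩ :=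
          ih (fun q hq => hL q (by simp [hq])) (insert j V) a1 (comp ++ [j]) (nxt ++ [j])
            (Finset.insert_subset hjC hVC) (Finset.mem_insert_of_mem huV) hov1
        have hjV' : j ∈ V' := h1 (Finset.mem_insert_self _ _)
        refine ⟨V', a', j :: dnew, Finset.Subset.trans (Finset.subset_insert _ _) h1, h2, h3,
          ?_, ?_, ?_, ?_, ?_, ?_⟩
        · rw [List.nodup_cons]
          exact ⟨fun h => (h5 j h).2 (Finset.mem_insert_self _ _), h4⟩
        · intro x hx
          rcases List.mem_cons.mp hx with h | h
          · subst h; exact ⟨hjV', hjV⟩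
          · exact ⟨(h5 x h).1, fun hv => (h5 x h).2 (Finset.mem_insert_of_mem hv)⟩
        · intro x hxV' hxV
          by_cases hxj : x = j
          · simp [hxj]
          · have := h6 x hxV' (by simp [hxj, hxV])
            simp [this]
        · intro q hq
          rcases List.mem_cons.mp hq with h | h
          · subst h; intro _; exact hjV'
          · exact h7 q h
        · have hcard : (insert j V).card = V.card + 1 := Finset.card_insert_of_notMem hjV
          simp only [List.length_cons]
          omega
        · simp only [solveScanB]
          rw [if_neg hlt]
          rw [h9]
          simp
      · have hja1 : pvRd a0 j = PySem.Int.bxor (l u) t := hclose.2 hja0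
        have rdj : PySem.List.pyGetD a j (-1) = pvRd a0 j := by
          have := rdj0; rw [if_neg hjV] at this; exact this
        have h01 : 0 ≤ pvRd a0 j := by
          rcases h0.2 j hj0 hjn with h | h
          · exact absurd h hja0
          · exact h
        have hge : PySem.List.pyGetD a j (-1) ≥ 0 := by rw [rdj]; omega
        obtain ⟨V', a', dnew, h1, h2, h3, h4, h5, h6, h7, h8, h9⟩ :=
          ih (fun q hq => hL q (by simp [hq])) V a comp nxt hVC huV hov
        refine ⟨V', a', dnew, h1, h2, h3, h4, h5, h6, ?_, h8, ?_⟩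
        · intro q hq
          rcases List.mem_cons.mp hq with h | h
          · subst h; intro hc; exact absurd hc hja0
          · exact h7 q h
        · simp only [solveScanB]
          rw [if_pos hge, rdj, rdu, ← hja1, if_neg (by simp)]
          exact h9

lemma pvLayerB_fwd {n : Int} {g : List (List (Int × Int))} {a0 : List Int} {s : Int}
    {C : Finset Int} {l : Int → Int}
    (hwf : pvWF n g) (h0 : pvA0 n a0) (hC : pvIsComp n g a0 s C l) :
    ∀ (F : List Int) (V : Finset Int) (a comp nxt : List Int),
      V ⊆ C → (∀ x ∈ F, x ∈ V) → pvOver a0 V l a →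
    ∃ (V' : Finset Int) (a' : List Int) (dnew : List Int),
      V ⊆ V' ∧ V' ⊆ C ∧ pvOver a0 V' l a' ∧
      dnew.Nodup ∧ (∀ x ∈ dnew, x ∈ V' ∧ x ∉ V) ∧ (∀ x ∈ V', x ∉ V → x ∈ dnew) ∧
      (∀ u ∈ F, pvExpM g a0 V' u) ∧
      dnew.length + V.card = V'.card ∧
      solveLayerB g F a comp nxt = some (a', comp ++ dnew, nxt ++ dnew) := by
  intro F
  induction F with
  | nil =>
    intro V a comp nxt hVC _ hov
    exact ⟨V, a, [], Finset.Subset.refl _, hVC, hov, List.nodup_nil, by simp, by tauto,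
      by simp, by simp, by simp [solveLayerB]⟩
  | cons u rest ih =>
    intro V a comp nxt hVC hF hov
    have huV : u ∈ V := hF u (by simp)
    have huC : u ∈ C := hVC huV
    obtain ⟨V1, a1, dnew1, h1, h2, h3, h4, h5, h6, h7, h8, h9⟩ :=
      pvScanB_fwd hwf h0 hC huC (pvAdj g u) (fun p hp => hp) V a comp nxt hVC huV hov
    obtain ⟨V', a', dnew2, k1, k2, k3, k4, k5, k6, k7, k8, k9⟩ :=
      ih V1 a1 (comp ++ dnew1) (nxt ++ dnew1) h2
        (fun x hx => h1 (hF x (by simp [hx]))) h3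
    refine ⟨V', a', dnew1 ++ dnew2, Finset.Subset.trans h1 k1, k2, k3, ?_, ?_, ?_, ?_, ?_, ?_⟩
    · rw [List.nodup_append]
      refine ⟨h4, k4, ?_⟩
      intro x hx b hb
      exact fun hxb => (k5 b hb).2 (by rw [← hxb]; exact (h5 x hx).1)
    · intro x hx
      rcases List.mem_append.mp hx with h | h
      · exact ⟨k1 (h5 x h).1, (h5 x h).2⟩
      · exact ⟨(k5 x h).1, fun hv => (k5 x h).2 (h1 hv)⟩
    · intro x hxV' hxV
      by_cases hx1 : x ∈ V1
      · exact List.mem_append.mpr (Or.inl (h6 x hx1 hxV))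
      · exact List.mem_append.mpr (Or.inr (k6 x hxV' hx1))
    · intro w hw
      rcases List.mem_cons.mp hw with h | h
      · subst h
        intro p hp hp0
        exact k1 (h7 p hp hp0)
      · exact k7 w h
    · have c1 : V.card ≤ V1.card := Finset.card_le_card h1
      simp only [List.length_append]
      omega
    · have hrw : PySem.List.pyGetD g u [] = pvAdj g u := rfl
      simp only [solveLayerB, hrw, h9]
      rw [k9]
      simp

lemma pvWhileB_fwd {n : Int} {g : List (List (Int × Int))} {a0 : List Int} {s : Int}
    {C : Finset Int} {l : Int → Int}
    (hwf : pvWF n g) (h0 : pvA0 n a0) (hC : pvIsComp n g a0 s C l) :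
    ∀ (fuel : Nat) (V : Finset Int) (a comp F : List Int),
      V ⊆ C → s ∈ V → pvOver a0 V l a →
      comp.Nodup → comp.toFinset = V →
      (∀ x ∈ F, x ∈ V) →
      (∀ u ∈ V, u ∉ F → pvExpM g a0 V u) →
      (F = [] ∨ 1 + (C.card - V.card) ≤ fuel) →
      ∃ a' comp', pvOver a0 C l a' ∧ comp'.Nodup ∧ comp'.toFinset = C ∧
        solveWhileB g fuel a comp F = some (a', comp') := by
  intro fuel
  induction fuel with
  | zero =>
    intro V a comp F hVC hsV hov hnd hset hF hexp hfuel
    match F, hF, hexp, hfuel with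
    | [], _, hexp, _ =>
      have hVC' : V = C := pvVC hC hVC hsV (fun u hu => hexp u hu (by simp))
      subst hVC'
      exact ⟨a, comp, hov, hnd, hset, by simp [solveWhileB]⟩
    | (u :: rest), _, _, hfuel =>
      rcases hfuel with h | h
      · exact absurd h (by simp)
      · omega
  | succ f ih =>
    intro V a comp F hVC hsV hov hnd hset hF hexp hfuel
    match F, hF, hexp, hfuel with
    | [], _, hexp, _ =>
      have hVC' : V = C := pvVC hC hVC hsV (fun u hu => hexp u hu (by simp))
      subst hVC'
      exact ⟨a, comp, hov, hnd, hset, by simp [solveWhileB]⟩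
    | (u :: rest), hF, hexp, hfuel =>
      obtain ⟨V1, a1, dnew, h1, h2, h3, h4, h5, h6, h7, h8, h9⟩ :=
        pvLayerB_fwd hwf h0 hC (u :: rest) V a comp [] hVC hF hov
      have hnd1 : (comp ++ dnew).Nodup := by
        rw [List.nodup_append]
        refine ⟨hnd, h4, ?_⟩
        intro x hx b hb
        intro hxb
        apply (h5 b hb).2
        rw [← hxb] at *
        rw [← hset]
        exact List.mem_toFinset.mpr hx
      have hset1 : (comp ++ dnew).toFinset = V1 := by
        apply Finset.ext
        intro x
        rw [List.toFinset_append, Finset.mem_union, List.mem_toFinset, List.mem_toFinset]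
        constructor
        · rintro (h | h)
          · exact h1 (hset ▸ List.mem_toFinset.mpr h)
          · exact (h5 x h).1
        · intro hx
          by_cases hxV : x ∈ V
          · exact Or.inl (List.mem_toFinset.mp (hset.symm ▸ hxV))
          · exact Or.inr (h6 x hx hxV)
      obtain ⟨a', comp', k1, k2, k3, k4⟩ := ih V1 a1 (comp ++ dnew) dnew h2 (h1 hsV) h3
        hnd1 hset1 (fun x hx => (h5 x hx).1)
        (by intro w hw hwd
            by_cases hwV : w ∈ V
            · by_cases hwF : w ∈ (u :: rest)
              · exact h7 w hwF
              · intro p hp hp0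
                exact h1 (hexp w hwV hwF p hp hp0)
            · exact absurd (h6 w hw hwV) hwd)
        (by by_cases hd : dnew = []
            · exact Or.inl hd
            · right
              have hlen : dnew.length ≥ 1 := by
                cases dnew with
                | nil => exact absurd rfl hd
                | cons x xs => simp
              have c1 : V1.card ≤ C.card := Finset.card_le_card h2
              rcases hfuel with h | h
              · exact absurd h (by simp)
              · omega)
      refine ⟨a', comp', k1, k2, k3, ?_⟩
      simp only [solveWhileB]
      rw [h9]
      simpa using k4

-- ===== backward lemmas for port B =====
lemma pvScanB_bwd {n : Int} {g : List (List (Int × Int))} {a0 : List Int} {s : Int}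
    (hwf : pvWF n g) (h0 : pvA0 n a0) {u : Int} :
    ∀ (L : List (Int × Int)), (∀ p ∈ L, p ∈ pvAdj g u) →
    ∀ (V : Finset Int) (a comp nxt : List Int) (res : List Int × List Int × List Int),
      pvInvB n g a0 s V a → u ∈ V → (∀ x ∈ nxt, x ∈ V) →
      solveScanB u L a comp nxt = some res →
      ∃ V', V ⊆ V' ∧ pvInvB n g a0 s V' res.1 ∧
        (∀ x ∈ res.2.2, x ∈ V') ∧ (∀ x ∈ nxt, x ∈ res.2.2) ∧
        (∀ x ∈ V', x ∉ V → x ∈ res.2.2) ∧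
        (∀ x, 0 ≤ x → x < n → pvRd a x ≠ -1 → pvRd res.1 x = pvRd a x) ∧
        (∀ p ∈ L, (pvRd a0 p.1 = -1 → p.1 ∈ V') ∧
          pvRd res.1 p.1 = PySem.Int.bxor (pvRd res.1 u) p.2) := by
  intro L
  induction L with
  | nil =>
    intro _ V a comp nxt res hinv huV hnxt hres
    simp only [solveScanB, Option.some.injEq] at hres
    subst hres
    exact ⟨V, Finset.Subset.refl _, hinv, hnxt, fun x hx => hx, by tauto,
      fun x _ _ _ => rfl, by simp⟩
  | cons p rest ih =>
    intro hL V a comp nxt res hinv huV hnxt hres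
    obtain ⟨j, t⟩ := p
    have hpmem : ((j, t) : Int × Int) ∈ pvAdj g u := hL _ (by simp)
    obtain ⟨hu0, hun, hua0, hau01, hureach⟩ := hinv.2.2.2.1 u huV
    obtain ⟨hj0, hjn, ht01⟩ := hwf.2.2 u hu0 hun (j, t) hpmem
    simp only at hj0 hjn ht01
    have hlen : a.length = a0.length := hinv.1
    have hlenn : (a0.length : Int) = n := h0.1
    have hau01 : 0 ≤ PySem.List.pyGetD a u (-1) := hau01
    simp only [solveScanB] at hres
    by_cases hge : PySem.List.pyGetD a j (-1) ≥ 0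
    · rw [if_pos hge] at hres
      by_cases hne : PySem.List.pyGetD a j (-1) ≠ PySem.Int.bxor (PySem.List.pyGetD a u (-1)) t
      · rw [if_pos hne] at hres
        exact absurd hres (by simp)
      · rw [if_neg hne] at hres
        push_neg at hne
        obtain ⟨V', h1, h2, h3, h4, h5, h6, h7⟩ :=
          ih (fun q hq => hL q (by simp [hq])) V a comp nxt res hinv huV hnxt hres
        refine ⟨V', h1, h2, h3, h4, h5, h6, ?_⟩
        intro q hq
        rcases List.mem_cons.mp hq with h | h
        · subst h
          constructor
          · intro ha0j
            have ha0j' : pvRd a0 j = -1 := ha0j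
            by_cases hjV : j ∈ V
            · exact h1 hjV
            · exfalso
              have hjout := hinv.2.2.2.2 j hj0 hjn hjV
              unfold pvRd at hjout ha0j'
              rw [ha0j'] at hjout
              omega
          · have hju : pvRd res.1 j = pvRd a j := by
              apply h6 j hj0 hjn
              unfold pvRd
              omega
            have huu : pvRd res.1 u = pvRd a u := by
              apply h6 u hu0 hun
              unfold pvRd
              omega
            unfold pvRd at hju huu ⊢
            rw [hju, huu]
            exact hne
        · exact h7 q h
    · rw [if_neg hge] at hres
      push_neg at hge
      have hjV : j ∉ V := by
        intro h
        obtain ⟨_, _, _, hv, _⟩ := hinv.2.2.2.1 j h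
        unfold pvRd at hv
        omega
      have haj : PySem.List.pyGetD a j (-1) = PySem.List.pyGetD a0 j (-1) :=
        hinv.2.2.2.2 j hj0 hjn hjV
      have ha0j : pvRd a0 j = -1 := by
        unfold pvRd
        rcases h0.2 j hj0 hjn with h | h <;> unfold pvRd at h <;> omega
      have hw01 : 0 ≤ PySem.Int.bxor (PySem.List.pyGetD a u (-1)) t := pvBxor_nonneg hau01 ht01
      obtain ⟨hs0, hsn, _⟩ := hinv.2.2.2.1 s hinv.2.1
      have hsj : s ≠ j := by
        intro h
        have := hinv.2.2.1
        unfold pvRd at this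
        rw [h] at this
        omega
      have hset : ∀ x : Int, 0 ≤ x → x < n →
          pvRd (PySem.List.pySetD a j (PySem.Int.bxor (PySem.List.pyGetD a u (-1)) t)) x =
            if x = j then PySem.Int.bxor (PySem.List.pyGetD a u (-1)) t else pvRd a x := by
        intro x hx0 hxn
        exact pvRd_set a j _ x hj0 (by omega) hx0 (by omega)
      have hinv1 : pvInvB n g a0 s (insert j V)
          (PySem.List.pySetD a j (PySem.Int.bxor (PySem.List.pyGetD a u (-1)) t)) := by
        refine ⟨by rw [PySem.List.length_pySetD]; exact hlen, Finset.mem_insert_of_mem hinv.2.1, ?_, ?_, ?_⟩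
        · rw [hset s hs0 hsn, if_neg hsj]
          exact hinv.2.2.1
        · intro v hv
          rcases Finset.mem_insert.mp hv with h | h
          · rw [h]
            refine ⟨hj0, hjn, ha0j, ?_, ?_⟩
            · rw [hset j hj0 hjn, if_pos rfl]
              exact hw01
            · exact Relation.ReflTransGen.tail hureach ⟨t, hpmem, ha0j⟩
          · obtain ⟨h1', h2', h3', h4', h5'⟩ := hinv.2.2.2.1 v h
            refine ⟨h1', h2', h3', ?_, h5'⟩
            rw [hset v h1' h2', if_neg (by intro e; subst e; exact hjV h)]
            exact h4'
        · intro v hv0 hvn hv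
          rw [hset v hv0 hvn, if_neg (by intro e; subst e; exact hv (Finset.mem_insert_self _ _))]
          exact hinv.2.2.2.2 v hv0 hvn (fun h => hv (Finset.mem_insert_of_mem h))
      obtain ⟨V', h1, h2, h3, h4, h5, h6, h7⟩ :=
        ih (fun q hq => hL q (by simp [hq])) (insert j V)
          (PySem.List.pySetD a j (PySem.Int.bxor (PySem.List.pyGetD a u (-1)) t))
          (comp ++ [j]) (nxt ++ [j]) res hinv1
          (Finset.mem_insert_of_mem huV)
          (by intro x hx
              rcases List.mem_append.mp hx with h | h
              · exact Finset.mem_insert_of_mem (hnxt x h)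
              · simp only [List.mem_singleton] at h; subst h; exact Finset.mem_insert_self _ _)
          hres
      have hjres : j ∈ res.2.2 := h4 j (by simp)
      have hpres : ∀ x, 0 ≤ x → x < n → pvRd a x ≠ -1 → pvRd res.1 x = pvRd a x := by
        intro x hx0 hxn hxc
        have hxj : x ≠ j := by
          intro e
          apply hxc
          rw [e]
          unfold pvRd
          rw [haj]
          exact ha0j
        have e1 : pvRd (PySem.List.pySetD a j (PySem.Int.bxor (PySem.List.pyGetD a u (-1)) t)) x
            = pvRd a x := by rw [hset x hx0 hxn, if_neg hxj]
        rw [← e1]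
        apply h6 x hx0 hxn
        rw [e1]
        exact hxc
      refine ⟨V', Finset.Subset.trans (Finset.subset_insert _ _) h1, h2, h3,
        (fun x hx => h4 x (by simp [hx])), ?_, hpres, ?_⟩
      · intro x hxV' hxV
        by_cases hxj : x = j
        · subst hxj; exact hjres
        · exact h5 x hxV' (by simp [hxj, hxV])
      · intro q hq
        rcases List.mem_cons.mp hq with h | h
        · subst h
          refine ⟨fun _ => h1 (Finset.mem_insert_self _ _), ?_⟩
          have e1 : pvRd (PySem.List.pySetD a j (PySem.Int.bxor (PySem.List.pyGetD a u (-1)) t)) j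
              = PySem.Int.bxor (PySem.List.pyGetD a u (-1)) t := by rw [hset j hj0 hjn, if_pos rfl]
          have e2 : pvRd (PySem.List.pySetD a j (PySem.Int.bxor (PySem.List.pyGetD a u (-1)) t)) u
              = pvRd a u := by
            rw [hset u hu0 hun, if_neg (by intro e; subst e; exact hjV huV)]
          have hju : pvRd res.1 j = PySem.Int.bxor (PySem.List.pyGetD a u (-1)) t := by
            rw [← e1]
            apply h6 j hj0 hjn
            rw [e1]
            omega
          have huu : pvRd res.1 u = pvRd a u := by
            rw [← e2]
            apply h6 u hu0 hun
            rw [e2]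
            unfold pvRd
            omega
          rw [hju, huu]
          rfl
        · exact h7 q h

lemma pvLayerB_bwd {n : Int} {g : List (List (Int × Int))} {a0 : List Int} {s : Int}
    (hwf : pvWF n g) (h0 : pvA0 n a0) :
    ∀ (F : List Int), ∀ (V : Finset Int) (a comp nxt : List Int) (res : List Int × List Int × List Int),
      pvInvB n g a0 s V a → (∀ x ∈ F, x ∈ V) → (∀ x ∈ nxt, x ∈ V) →
      solveLayerB g F a comp nxt = some res →
      ∃ V', V ⊆ V' ∧ pvInvB n g a0 s V' res.1 ∧
        (∀ x ∈ res.2.2, x ∈ V') ∧ (∀ x ∈ nxt, x ∈ res.2.2) ∧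
        (∀ x ∈ V', x ∉ V → x ∈ res.2.2) ∧
        (∀ x, 0 ≤ x → x < n → pvRd a x ≠ -1 → pvRd res.1 x = pvRd a x) ∧
        (∀ u ∈ F, pvExp g res.1 a0 V' u) := by
  intro F
  induction F with
  | nil =>
    intro V a comp nxt res hinv _ hnxt hres
    simp only [solveLayerB, Option.some.injEq] at hres
    subst hres
    exact ⟨V, Finset.Subset.refl _, hinv, hnxt, fun x hx => hx, by tauto,
      fun x _ _ _ => rfl, by simp⟩
  | cons u rest ih =>
    intro V a comp nxt res hinv hF hnxt hres
    have huV : u ∈ V := hF u (by simp)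
    simp only [solveLayerB] at hres
    cases hscan : solveScanB u (PySem.List.pyGetD g u []) a comp nxt with
    | none => rw [hscan] at hres; exact absurd hres (by simp)
    | some val =>
      obtain ⟨a1, comp1, nxt1⟩ := val
      rw [hscan] at hres
      obtain ⟨V1, h1, h2, h3, h4, h5, h6, h7⟩ :=
        pvScanB_bwd hwf h0 (pvAdj g u) (fun p hp => hp) V a comp nxt (a1, comp1, nxt1)
          hinv huV hnxt hscan
      obtain ⟨V', k1, k2, k3, k4, k5, k6, k7⟩ :=
        ih V1 a1 comp1 nxt1 res h2 (fun x hx => h1 (hF x (by simp [hx]))) h3 hres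
      refine ⟨V', Finset.Subset.trans h1 k1, k2, k3,
        (fun x hx => k4 x (h4 x hx)), ?_, ?_, ?_⟩
      · intro x hxV' hxV
        by_cases hx1 : x ∈ V1
        · exact k4 x (h5 x hx1 hxV)
        · exact k5 x hxV' hx1
      · intro x hx0 hxn hxc
        have e1 : pvRd a1 x = pvRd a x := h6 x hx0 hxn hxc
        rw [← e1]
        apply k6 x hx0 hxn
        rw [e1]
        exact hxc
      · intro w hw
        rcases List.mem_cons.mp hw with h | h
        · subst h
          exact pvExp_mono hwf h2 k1 k6 (h1 huV) (fun p hp => h7 p hp)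
        · exact k7 w h

lemma pvWhileB_bwd {n : Int} {g : List (List (Int × Int))} {a0 : List Int} {s : Int}
    (hwf : pvWF n g) (h0 : pvA0 n a0) :
    ∀ (fuel : Nat) (V : Finset Int) (a comp F : List Int) (res : List Int × List Int),
      pvInvB n g a0 s V a → (∀ x ∈ F, x ∈ V) →
      (∀ u ∈ V, u ∉ F → pvExp g a a0 V u) →
      solveWhileB g fuel a comp F = some res →
      ∃ C l, pvIsComp n g a0 s C l := by
  intro fuel
  induction fuel with
  | zero =>
    intro V a comp F res hinv hF hexp hres
    match F, hF, hexp, hres with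
    | [], _, hexp, _ =>
      exact ⟨V, fun v => pvRd a v, pvInvB_isComp hwf h0 hinv (fun u hu => hexp u hu (by simp))⟩
    | (u :: rest), _, _, hres => simp [solveWhileB] at hres
  | succ f ih =>
    intro V a comp F res hinv hF hexp hres
    match F, hF, hexp, hres with
    | [], _, hexp, _ =>
      exact ⟨V, fun v => pvRd a v, pvInvB_isComp hwf h0 hinv (fun u hu => hexp u hu (by simp))⟩
    | (u :: rest), hF, hexp, hres =>
      simp only [solveWhileB] at hres
      cases hlay : solveLayerB g (u :: rest) a comp [] with
      | none => rw [hlay] at hres; exact absurd hres (by simp)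
      | some val =>
        obtain ⟨a1, comp1, nxt1⟩ := val
        rw [hlay] at hres
        obtain ⟨V1, h1, h2, h3, h4, h5, h6, h7⟩ :=
          pvLayerB_bwd hwf h0 (u :: rest) V a comp [] (a1, comp1, nxt1) hinv hF (by simp) hlay
        exact ih V1 a1 comp1 nxt1 res h2 h3
          (by intro w hw hwn
              by_cases hwV : w ∈ V
              · by_cases hwF : w ∈ (u :: rest)
                · exact h7 w hwF
                · exact pvExp_mono hwf hinv h1 h6 hwV (hexp w hwV hwF)
              · exact absurd (h5 w hw hwV) hwn)
          hres

-- ===== outer loop: the two ports agree component by component =====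
lemma pvOuter_eq {n : Int} {g : List (List (Int × Int))} (hwf : pvWF n g) :
    ∀ (idxs : List Int) (a : List Int) (ans : Int),
      (∀ i ∈ idxs, 0 ≤ i ∧ i < n) → pvA0 n a →
      solveOuterA g idxs a ans = solveOuterB g idxs a ans := by
  intro idxs
  induction idxs with
  | nil => intro a ans _ _; simp [solveOuterA, solveOuterB]
  | cons i rest ih =>
    intro a ans hidx h0
    obtain ⟨hi0, hin⟩ := hidx i (by simp)
    have hlen : (a.length : Int) = n := h0.1
    simp only [solveOuterA, solveOuterB]
    by_cases hc : PySem.List.pyGetD a i (-1) < 0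
    · rw [if_pos hc, if_neg (by omega)]
      have ha0i : pvRd a i = -1 := by
        unfold pvRd
        rcases h0.2 i hi0 hin with h | h <;> unfold pvRd at h <;> omega
      have hset : ∀ x : Int, 0 ≤ x → x < n →
          pvRd (PySem.List.pySetD a i 0) x = if x = i then 0 else pvRd a x := by
        intro x hx0 hxn
        exact pvRd_set a i 0 x hi0 (by omega) hx0 (by omega)
      have hlen1 : (PySem.List.pySetD a i 0).length = a.length := PySem.List.length_pySetD _ _ _
      have hinv : pvInvB n g a i {i} (PySem.List.pySetD a i 0) := by
        refine ⟨hlen1, Finset.mem_singleton_self i, ?_, ?_, ?_⟩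
        · rw [hset i hi0 hin, if_pos rfl]
        · intro v hv
          rw [Finset.mem_singleton] at hv
          subst hv
          exact ⟨hi0, hin, ha0i, by rw [hset v hi0 hin, if_pos rfl],
            Relation.ReflTransGen.refl⟩
        · intro v hv0 hvn hv
          rw [Finset.mem_singleton] at hv
          rw [hset v hv0 hvn, if_neg hv]
      have hexpv : ∀ u ∈ ({i} : Finset Int), u ∉ ([i] : List Int) → pvExp g (PySem.List.pySetD a i 0) a ({i} : Finset Int) u := by
        intro u hu hdq
        exfalso
        rw [Finset.mem_singleton] at hu
        subst hu
        exact hdq (by simp)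
      by_cases hex : ∃ C l, pvIsComp n g a i C l
      · obtain ⟨C, l, hC⟩ := hex
        have hiC : i ∈ C := hC.1
        have hcard : C.card ≤ n.toNat :=
          pvCard_le C n (fun v hv => ⟨(hC.2.2.1 v hv).1, (hC.2.2.1 v hv).2.1⟩)
        have hcpos : 0 < C.card := Finset.card_pos.mpr ⟨i, hiC⟩
        have hlennat : a.length = n.toNat := by omega
        have hov1 : pvOver a ({i} : Finset Int) l (PySem.List.pySetD a i 0) := by
          refine ⟨hlen1, ?_⟩
          intro v hv0 hvn
          rw [hset v hv0 (by omega)]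
          by_cases hvi : v = i
          · subst hvi
            rw [if_pos rfl, if_pos (Finset.mem_singleton_self _)]
            exact hC.2.1.symm
          · rw [if_neg hvi, if_neg (by rw [Finset.mem_singleton]; exact hvi)]
        obtain ⟨aA, hovA, heqA⟩ :=
          pvLoopA_fwd hwf h0 hC (2 * a.length + 1) {i} (PySem.List.pySetD a i 0) [i]
            (Finset.singleton_subset_iff.mpr hiC) (Finset.mem_singleton_self i) hov1
            (by simp) (List.nodup_singleton i)
            (by intro u hu hdq
                exfalso
                rw [Finset.mem_singleton] at hu
                subst hu
                exact hdq (by simp))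
            (by simp only [List.length_singleton, Finset.card_singleton]
                omega)
        obtain ⟨aB, compB, hovB, hndB, hsetB, heqB⟩ :=
          pvWhileB_fwd hwf h0 hC (a.length + 1) {i} (PySem.List.pySetD a i 0) [i] [i]
            (Finset.singleton_subset_iff.mpr hiC) (Finset.mem_singleton_self i) hov1
            (List.nodup_singleton i) (by simp)
            (by simp)
            (by intro u hu hdq
                exfalso
                rw [Finset.mem_singleton] at hu
                subst hu
                exact hdq (by simp))
            (Or.inr (by simp only [Finset.card_singleton]; omega))
        have e1 : ((({i} : Finset Int)).card : Int) = 1 := by simp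
        have e2 : (∑ v ∈ ({i} : Finset Int), l v) = 0 := by
          rw [Finset.sum_singleton]
          exact hC.2.1
        rw [e1, e2] at heqA
        rw [heqA, heqB]
        dsimp only
        have haAB : aA = aB := pvOver_eq hovA hovB
        have hmap : compB.map (fun v => PySem.List.pyGetD aB v (-1)) = compB.map l := by
          apply List.map_congr_left
          intro v hv
          have hvC : v ∈ C := by rw [← hsetB]; exact List.mem_toFinset.mpr hv
          obtain ⟨hv0, hvn, _, _, _⟩ := hC.2.2.1 v hvC
          have := hovB.2 v hv0 (by omega)
          rw [if_pos hvC] at this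
          exact this
        have hsum : ∑ v ∈ C, l v = (compB.map l).sum := by
          rw [← hsetB]
          exact List.sum_toFinset l hndB
        have hlenc : (compB.length : Int) = (C.card : Int) := by
          rw [← hsetB, List.toFinset_card_of_nodup hndB]
        have h0' : pvA0 n aA := by
          refine ⟨by rw [hovA.1]; exact hlen, ?_⟩
          intro v hv0 hvn
          have := hovA.2 v hv0 (by omega)
          by_cases hvC : v ∈ C
          · rw [if_pos hvC] at this
            rw [this]
            exact Or.inr (hC.2.2.1 v hvC).2.2.2.1
          · rw [if_neg hvC] at this
            rw [this]
            exact h0.2 v hv0 hvn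
        rw [haAB] at h0' ⊢
        rw [hmap, ← hsum, hlenc]
        exact ih aB _ (fun x hx => hidx x (by simp [hx])) h0'
      · cases hLA : solveLoopA g (2 * a.length + 1) (PySem.List.pySetD a i 0) [i] 1 0 with
        | some resA =>
          exact absurd
            (pvLoopA_bwd hwf h0 (2 * a.length + 1) {i} (PySem.List.pySetD a i 0) [i] 1 0 resA
              hinv (by simp) hexpv hLA) hex
        | none =>
          cases hLB : solveWhileB g (a.length + 1) (PySem.List.pySetD a i 0) [i] [i] with
          | some resB =>
            exact absurd
              (pvWhileB_bwd hwf h0 (a.length + 1) {i} (PySem.List.pySetD a i 0) [i] [i] resB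
                hinv (by simp) hexpv hLB) hex
          | none => rfl
    · rw [if_neg hc, if_pos (by omega)]
      exact ih a ans (fun x hx => hidx x (by simp [hx])) h0

-- ===== VERDICT (by name: the statement is the Claim_ definition above) =====
theorem solve_spec : Claim_equal_solve := by
  unfold Claim_equal_solve
  intro n m g _ hpre
  unfold Spec_solve solve solve_alt
  by_cases hn : 0 < n
  case neg =>
    rw [PySem.List.pyRange_one_eq_nil (by omega)]
    rfl
  obtain ⟨hng, harcs⟩ := hpre hn
  have hn0 : 0 ≤ n := le_of_lt hn
  have hwf : pvWF n g := by
    refine ⟨hn0, hng, ?_⟩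
    intro u hu0 hun p hp
    have hlt : u.toNat < g.length := by omega
    have hadj : pvAdj g u = g[u.toNat] := by
      unfold pvAdj
      rw [PySem.List.pyGetD_eq_getElem g [] hu0 (by omega)]
    rw [hadj] at hp
    have htk : u.toNat < (g.take n.toNat).length := by
      rw [List.length_take]
      omega
    have hmem : g[u.toNat] ∈ g.take n.toNat := by
      have e := List.getElem_take (xs := g) (j := n.toNat) (i := u.toNat) (h := htk)
      rw [← e]
      exact List.getElem_mem htk
    exact harcs _ hmem p hp
  have h0 : pvA0 n (List.replicate n.toNat (-1 : Int)) := by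
    refine ⟨?_, ?_⟩
    · rw [List.length_replicate]
      omega
    · intro v hv0 hvn
      left
      unfold pvRd
      rw [PySem.List.pyGetD_eq_getElem _ _ hv0 (by rw [List.length_replicate]; omega)]
      simp
  have hidx : ∀ i ∈ PySem.List.pyRange 0 n 1, 0 ≤ i ∧ i < n := by
    intro i hi
    rw [PySem.List.mem_pyRange_one] at hi
    exact hi
  exact pvOuter_eq hwf (PySem.List.pyRange 0 n 1) (List.replicate n.toNat (-1)) 0 hidx h0
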